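-- pv_equiv track=rewrite | github.com/mahmood726-cyber/qualsynth | qualsynth/formal_concept.py | _derive_themes
-- ===== SOURCE A (Python) =====
-- def _derive_themes(A, M, I):
--     """A' = {m in M : for all g in A, (g,m) in I} — themes common to all studies in A."""
--     if not A:
--         return frozenset(M)
--     result = []
--     for m in M:
--         if all((g, m) in I for g in A):
--             result.append(m)
--     return frozenset(result)
-- ===== SOURCE B (Python) =====
-- def _derive_themes(A, M, I):
--     """A' = {m in M : for all g in A, (g,m) in I} — one scan of I plus set intersections."""
--     Aset = set(A)
--     attrs = {}
--     for g, m in I: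
--         if g in Aset:
--             attrs.setdefault(g, set()).add(m)
--     common = set(M)
--     for g in Aset:
--         common &= attrs.get(g, set())
--     return frozenset(common)
-- ===== Notes on version B (the rewrite author's own statement) =====
-- stated objective: alternative
-- what changed: Instead of testing every m in M by scanning I for each g in A, B makes one pass over I building a per-object attribute-set dict and then intersects those sets across A (seeded with set(M)); it also needs no special case for empty A.
import Mathlib
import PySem

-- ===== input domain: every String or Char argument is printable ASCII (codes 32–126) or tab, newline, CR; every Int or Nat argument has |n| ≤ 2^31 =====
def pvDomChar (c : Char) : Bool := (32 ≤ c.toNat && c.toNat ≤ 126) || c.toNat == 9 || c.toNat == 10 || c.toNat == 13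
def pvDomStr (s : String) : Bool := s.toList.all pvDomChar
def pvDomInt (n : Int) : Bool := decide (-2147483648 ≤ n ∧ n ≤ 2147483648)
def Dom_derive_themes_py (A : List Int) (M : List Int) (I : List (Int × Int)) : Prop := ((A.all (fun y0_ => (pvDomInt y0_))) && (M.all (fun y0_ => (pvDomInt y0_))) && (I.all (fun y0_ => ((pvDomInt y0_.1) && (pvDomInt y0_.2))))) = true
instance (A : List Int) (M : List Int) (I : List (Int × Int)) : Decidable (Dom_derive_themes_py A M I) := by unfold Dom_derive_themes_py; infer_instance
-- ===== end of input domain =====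

-- B replaces A's per-attribute membership sweeps over I with one pass over I building a
-- per-object attribute-set dict, then intersects those sets across A (objective: alternative).
-- ===== PORT A =====
def derive_themes_py (A : List Int) (M : List Int) (I : List (Int × Int)) : List Int :=
  if A = [] then PySem.Set.ofList M
  else
    let result : List Int :=
      M.foldl (fun res m => if A.all (fun g => I.contains (g, m)) then res ++ [m] else res) []
    PySem.Set.ofList result

-- ===== PORT B =====
def derive_themes_py_alt (A : List Int) (M : List Int) (I : List (Int × Int)) : List Int :=
  let Aset : PySem.Set Int := PySem.Set.ofList A
  let attrs : PySem.Dict Int (PySem.Set Int) :=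
    I.foldl (fun d p =>
      if Aset.contains p.1 then
        d.insert p.1 (PySem.Set.add (d.getD p.1 PySem.Set.empty) p.2)
      else d) PySem.Dict.empty
  let common : PySem.Set Int :=
    Aset.foldl (fun c g => PySem.Set.inter c (attrs.getD g PySem.Set.empty)) (PySem.Set.ofList M)
  common

-- ===== PRECONDITION & SPEC =====
def Spec_derive_themes_py (A : List Int) (M : List Int) (I : List (Int × Int)) (out : List Int) : Prop := out = derive_themes_py_alt A M I
instance (A : List Int) (M : List Int) (I : List (Int × Int)) (out : List Int) : Decidable (Spec_derive_themes_py A M I out) := by unfold Spec_derive_themes_py; infer_instance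

-- ===== CLAIM (what is proved, stated in full; the proofs are below) =====
def Claim_equal_derive_themes_py : Prop := ∀ (A : List Int) (M : List Int) (I : List (Int × Int)), Dom_derive_themes_py A M I → Spec_derive_themes_py A M I (derive_themes_py A M I)

-- ===== LEMMAS AND PROOFS =====

-- Bool membership bridge for PySem.Set.contains
lemma set_contains_iff (s : PySem.Set Int) (y : Int) : s.contains y = true ↔ y ∈ s :=
  List.contains_iff_mem

-- dedup (set construction) commutes with filter
lemma ofList_filter (p : Int → Bool) (xs : List Int) :
    PySem.Set.ofList (xs.filter p) = (PySem.Set.ofList xs).filter p := by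
  induction xs using List.reverseRecOn with
  | nil => rfl
  | append_singleton xs x ih =>
    have hA : PySem.Set.ofList (xs ++ [x]) = PySem.Set.add (PySem.Set.ofList xs) x := by
      simp [PySem.Set.ofList, List.foldl_append]
    have hB : PySem.Set.ofList (List.filter p xs ++ [x])
        = PySem.Set.add (PySem.Set.ofList (List.filter p xs)) x := by
      simp [PySem.Set.ofList, List.foldl_append]
    by_cases hm : x ∈ xs <;> by_cases hp : p x = true <;>
      simp [List.filter_append, hA, hB, ih, PySem.Set.add,
        List.mem_filter, PySem.Set.mem_ofList, hm, hp]

-- a fold of intersections is one filter by "member of every set"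
lemma foldl_inter (gs : List Int) (f : Int → PySem.Set Int) (s : List Int) :
    gs.foldl (fun c g => PySem.Set.inter c (f g)) s
      = s.filter (fun m => gs.all (fun g => (f g).contains m)) := by
  induction gs generalizing s with
  | nil => simp
  | cons g gs ih =>
    simp only [List.foldl_cons, List.all_cons]
    rw [show PySem.Set.inter s (f g) = s.filter (fun m => (f g).contains m) from rfl, ih,
      List.filter_filter]
    exact List.filter_congr (by intro m _; rw [Bool.and_comm])

-- what the attribute dict built from I contains
lemma attrs_mem (Aset : PySem.Set Int) (I : List (Int × Int))
    (d : PySem.Dict Int (PySem.Set Int)) (g m : Int) (hg : Aset.contains g = true) :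
    m ∈ (I.foldl (fun d p =>
          if Aset.contains p.1 then
            d.insert p.1 (PySem.Set.add (d.getD p.1 PySem.Set.empty) p.2)
          else d) d).getD g PySem.Set.empty
      ↔ m ∈ d.getD g PySem.Set.empty ∨ (g, m) ∈ I := by
  induction I generalizing d with
  | nil => simp
  | cons q I ih =>
    obtain ⟨a, b⟩ := q
    simp only [List.foldl_cons]
    by_cases ha : Aset.contains a = true
    · rw [if_pos ha, ih, PySem.Dict.getD_insert]
      by_cases hga : g = a
      · subst hga
        simp only [if_true, PySem.Set.mem_add, List.mem_cons, Prod.mk.injEq, true_and]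
        tauto
      · rw [if_neg hga]
        simp only [List.mem_cons, Prod.mk.injEq, hga, false_and]
        tauto
    · rw [if_neg ha, ih]
      have hga : g ≠ a := fun h => ha (h ▸ hg)
      simp only [List.mem_cons, Prod.mk.injEq, hga, false_and]
      tauto

-- the two filtering predicates agree
lemma pred_eq (A : List Int) (I : List (Int × Int)) (m : Int) :
    A.all (fun g => I.contains (g, m))
      = (PySem.Set.ofList A).all (fun g =>
          ((I.foldl (fun d p =>
              if (PySem.Set.ofList A).contains p.1 then
                d.insert p.1 (PySem.Set.add (d.getD p.1 PySem.Set.empty) p.2)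
              else d) PySem.Dict.empty).getD g PySem.Set.empty).contains m) := by
  have hemp : ∀ g : Int,
      (PySem.Dict.empty : PySem.Dict Int (PySem.Set Int)).getD g PySem.Set.empty
        = PySem.Set.empty := fun g => rfl
  rw [Bool.eq_iff_iff, List.all_eq_true, List.all_eq_true]
  constructor
  · intro h g hgset
    have hgA : g ∈ A := (PySem.Set.mem_ofList A g).mp hgset
    have hg : (PySem.Set.ofList A).contains g = true := (set_contains_iff _ _).mpr hgset
    exact (set_contains_iff _ _).mpr
      ((attrs_mem _ _ _ _ _ hg).mpr (Or.inr (List.contains_iff_mem.mp (h g hgA))))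
  · intro h g hgA
    have hgset : g ∈ PySem.Set.ofList A := (PySem.Set.mem_ofList A g).mpr hgA
    have hg : (PySem.Set.ofList A).contains g = true := (set_contains_iff _ _).mpr hgset
    have hm := (attrs_mem _ _ _ _ _ hg).mp ((set_contains_iff _ _).mp (h g hgset))
    rw [hemp] at hm
    rcases hm with h' | h'
    · exact absurd h' (by simp [PySem.Set.empty])
    · exact List.contains_iff_mem.mpr h'

-- ===== VERDICT (by name: the statement is the Claim_ definition above) =====
theorem derive_themes_py_spec : Claim_equal_derive_themes_py := by
  intro A M I _
  unfold Spec_derive_themes_py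
  simp only [derive_themes_py, derive_themes_py_alt]
  by_cases hA : A = []
  · subst hA
    simp [PySem.Set.ofList]
  · rw [if_neg hA]
    have hfold := PySem.List.foldl_append_if
      (fun m => A.all (fun g => I.contains (g, m))) (fun m : Int => m) M []
    simp only [List.nil_append] at hfold
    rw [hfold]
    simp only [List.map_id_fun', id]
    rw [ofList_filter, foldl_inter]
    exact List.filter_congr (fun m _ => pred_eq A I m)
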